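-- pv_equiv track=rewrite | github.com/StarAtNyte/MindGames | src/utils/mafia_agent.py | _detect_voting_contradiction
-- ===== SOURCE A (Python) =====
-- from typing import Dict, List, Optional, Tuple
--
-- def _detect_voting_contradiction(statements: List[str]) -> bool:
--     """Detect if player contradicted their voting intentions"""
--     voting_indicators = ['vote', 'eliminate', 'target', 'choose', 'pick']
--     trust_indicators = ['trust', 'support', 'believe', 'agree']
--     distrust_indicators = ['suspicious', 'doubt', 'worry', 'concern', 'mafia']
--
--     voting_stances = []
--     for statement in statements:
--         # Track positive vs negative stances
--         if any(indicator in statement for indicator in voting_indicators):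
--             if any(indicator in statement for indicator in trust_indicators):
--                 voting_stances.append('positive')
--             elif any(indicator in statement for indicator in distrust_indicators):
--                 voting_stances.append('negative')
--
--     # Contradiction if they switched from positive to negative or vice versa
--     return len(set(voting_stances)) > 1 and len(voting_stances) >= 2
-- ===== SOURCE B (Python) =====
-- def _detect_voting_contradiction(statements):
--     """Detect if player contradicted their voting intentions"""
--     voting_indicators = ['vote', 'eliminate', 'target', 'choose', 'pick']
--     trust_indicators = ['trust', 'support', 'believe', 'agree']
--     distrust_indicators = ['suspicious', 'doubt', 'worry', 'concern', 'mafia']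
--
--     def has(s, words):
--         return any(w in s for w in words)
--
--     positive = any(has(s, voting_indicators) and has(s, trust_indicators)
--                    for s in statements)
--     negative = any(has(s, voting_indicators) and not has(s, trust_indicators)
--                    and has(s, distrust_indicators)
--                    for s in statements)
--     return positive and negative
-- ===== Notes on version B (the rewrite author's own statement) =====
-- stated objective: simpler
-- what changed: Replaces the accumulated stance list plus set()-deduplication final check with two independent any() scans that each maintain a single boolean (a positive-stance flag and a negative-stance flag), returning their conjunction.
import Mathlib
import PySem

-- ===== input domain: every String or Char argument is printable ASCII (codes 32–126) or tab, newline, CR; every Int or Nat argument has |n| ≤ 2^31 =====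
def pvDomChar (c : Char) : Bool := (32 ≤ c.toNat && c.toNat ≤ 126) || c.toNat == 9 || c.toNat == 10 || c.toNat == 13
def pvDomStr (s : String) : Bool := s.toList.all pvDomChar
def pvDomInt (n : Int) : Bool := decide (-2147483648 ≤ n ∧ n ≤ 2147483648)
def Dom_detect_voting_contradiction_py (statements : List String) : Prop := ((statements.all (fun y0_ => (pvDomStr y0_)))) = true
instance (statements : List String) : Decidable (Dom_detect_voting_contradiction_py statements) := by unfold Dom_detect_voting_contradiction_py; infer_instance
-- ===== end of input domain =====

-- B replaces A's accumulated stance list + set()-dedup final check with two any() scans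
-- maintaining one boolean each (objective: simpler).

-- ===== PORT A =====
-- shared helper: `any(indicator in statement for indicator in inds)`
def pvAnyIn (inds : List String) (s : String) : Bool :=
  inds.any (fun i => PySem.Str.isIn i s)

def pvVoting : List String := ["vote", "eliminate", "target", "choose", "pick"]
def pvTrust : List String := ["trust", "support", "believe", "agree"]
def pvDistrust : List String := ["suspicious", "doubt", "worry", "concern", "mafia"]

def detect_voting_contradiction_py (statements : List String) : Bool :=
  let voting_stances : List String :=
    statements.foldl
      (fun acc statement =>
        if pvAnyIn pvVoting statement then
          if pvAnyIn pvTrust statement then acc ++ ["positive"]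
          else if pvAnyIn pvDistrust statement then acc ++ ["negative"]
          else acc
        else acc)
      []
  decide ((PySem.Set.ofList voting_stances).length > 1) && decide (voting_stances.length ≥ 2)

-- ===== PORT B =====
def detect_voting_contradiction_py_alt (statements : List String) : Bool :=
  let positive := statements.any (fun s => pvAnyIn pvVoting s && pvAnyIn pvTrust s)
  let negative := statements.any (fun s =>
    pvAnyIn pvVoting s && !pvAnyIn pvTrust s && pvAnyIn pvDistrust s)
  positive && negative

-- ===== PRECONDITION & SPEC =====
def Spec_detect_voting_contradiction_py (statements : List String) (out : Bool) : Prop := out = detect_voting_contradiction_py_alt statements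
instance (statements : List String) (out : Bool) : Decidable (Spec_detect_voting_contradiction_py statements out) := by unfold Spec_detect_voting_contradiction_py; infer_instance

-- ===== CLAIM (what is proved, stated in full; the proofs are below) =====
def Claim_equal_detect_voting_contradiction_py : Prop := ∀ (statements : List String), Dom_detect_voting_contradiction_py statements → Spec_detect_voting_contradiction_py statements (detect_voting_contradiction_py statements)

-- ===== LEMMAS AND PROOFS =====

-- the per-statement label A appends (as an Option)
def pvLab (s : String) : Option String :=
  if pvAnyIn pvVoting s then
    if pvAnyIn pvTrust s then some "positive"
    else if pvAnyIn pvDistrust s then some "negative"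
    else none
  else none

theorem pv_fold_eq (statements : List String) (acc : List String) :
    statements.foldl
      (fun acc statement =>
        if pvAnyIn pvVoting statement then
          if pvAnyIn pvTrust statement then acc ++ ["positive"]
          else if pvAnyIn pvDistrust statement then acc ++ ["negative"]
          else acc
        else acc)
      acc = acc ++ statements.filterMap pvLab := by
  induction statements generalizing acc with
  | nil => simp
  | cons s rest ih =>
    simp only [List.foldl_cons, List.filterMap_cons, pvLab]
    split_ifs <;> simp [ih, pvLab]

theorem pv_lab_mem (s : String) :
    (pvLab s = some "positive" ↔ (pvAnyIn pvVoting s && pvAnyIn pvTrust s) = true) ∧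
    (pvLab s = some "negative" ↔
      (pvAnyIn pvVoting s && !pvAnyIn pvTrust s && pvAnyIn pvDistrust s) = true) := by
  unfold pvLab
  split_ifs <;> simp_all

theorem pv_lab_cases (s : String) (x : String) (h : pvLab s = some x) :
    x = "positive" ∨ x = "negative" := by
  unfold pvLab at h
  split_ifs at h <;> simp_all

-- the final check over a list whose elements are only "positive"/"negative"
theorem pv_final_check (L : List String)
    (hL : ∀ x ∈ L, x = "positive" ∨ x = "negative") :
    (decide ((PySem.Set.ofList L).length > 1) && decide (L.length ≥ 2)) =
      (decide ("positive" ∈ L) && decide ("negative" ∈ L)) := by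
  induction L with
  | nil => simp
  | cons a rest ih =>
    have ha := hL a (by simp)
    have hrest : ∀ x ∈ rest, x = "positive" ∨ x = "negative" := fun x hx => hL x (by simp [hx])
    by_cases hp : "positive" ∈ a :: rest <;> by_cases hn : "negative" ∈ a :: rest
    · -- both present: show set length > 1 and length ≥ 2
      have h2 : (1 : ℕ) < (a :: rest).length := by
        rcases List.mem_iff_get.mp hp with ⟨i, hi⟩
        rcases List.mem_iff_get.mp hn with ⟨j, hj⟩
        have : i ≠ j := by rintro rfl; rw [hi] at hj; exact absurd hj (by decide)
        have := i.isLt; have := j.isLt; omega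
      have hset : 1 < (PySem.Set.ofList (a :: rest)).length := by
        have hps : "positive" ∈ PySem.Set.ofList (a :: rest) := (PySem.Set.mem_ofList _ _).mpr hp
        have hns : "negative" ∈ PySem.Set.ofList (a :: rest) := (PySem.Set.mem_ofList _ _).mpr hn
        rcases List.mem_iff_get.mp hps with ⟨i, hi⟩
        rcases List.mem_iff_get.mp hns with ⟨j, hj⟩
        have : i ≠ j := by rintro rfl; rw [hi] at hj; exact absurd hj (by decide)
        have := i.isLt; have := j.isLt; omega
      simp only [List.length_cons] at h2
      simp [hp, hn, hset]
      omega
    all_goals {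
      -- at most one distinct value occurs: set has ≤ 1 element
      have hone : ∀ x ∈ (a :: rest), x = a := by
        intro x hx
        rcases hL x hx with h1 | h1 <;> rcases ha with h2 | h2 <;>
          first
          | exact h1.trans h2.symm
          | (exfalso; first
              | exact hp (h1 ▸ hx)
              | exact hn (h1 ▸ hx)
              | exact hp (h2 ▸ List.mem_cons_self ..)
              | exact hn (h2 ▸ List.mem_cons_self ..))
      have hset : (PySem.Set.ofList (a :: rest)).length ≤ 1 := by
        have hsub : ∀ x ∈ PySem.Set.ofList (a :: rest), x = a := fun x hx =>
          hone x ((PySem.Set.mem_ofList _ _).mp hx)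
        have hnd := PySem.Set.nodup_ofList (a :: rest)
        rcases hcons : PySem.Set.ofList (a :: rest) with _ | ⟨y, ys⟩
        · simp
        · rcases ys with _ | ⟨z, zs⟩
          · simp
          · exfalso
            have hy := hsub y (by simp [hcons])
            have hz := hsub z (by simp [hcons])
            rw [hcons] at hnd
            simp [hy, hz] at hnd
      simp [hp, hn]
      intro h; omega
    }

-- ===== VERDICT (by name: the statement is the Claim_ definition above) =====
theorem detect_voting_contradiction_py_spec : Claim_equal_detect_voting_contradiction_py := by
  intro statements _
  unfold Spec_detect_voting_contradiction_py detect_voting_contradiction_py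
    detect_voting_contradiction_py_alt
  rw [pv_fold_eq]
  simp only [List.nil_append]
  have hmem : ∀ x ∈ statements.filterMap pvLab, x = "positive" ∨ x = "negative" := by
    intro x hx
    rcases List.mem_filterMap.mp hx with ⟨s, _, hs⟩
    exact pv_lab_cases s x hs
  have h1 : decide ("positive" ∈ statements.filterMap pvLab)
      = statements.any (fun s => pvAnyIn pvVoting s && pvAnyIn pvTrust s) := by
    rw [Bool.eq_iff_iff]
    simp only [decide_eq_true_eq, List.any_eq_true, List.mem_filterMap]
    exact exists_congr fun s => and_congr_right fun _ => (pv_lab_mem s).1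
  have h2 : decide ("negative" ∈ statements.filterMap pvLab)
      = statements.any (fun s => pvAnyIn pvVoting s && !pvAnyIn pvTrust s && pvAnyIn pvDistrust s) := by
    rw [Bool.eq_iff_iff]
    simp only [decide_eq_true_eq, List.any_eq_true, List.mem_filterMap]
    exact exists_congr fun s => and_congr_right fun _ => (pv_lab_mem s).2
  exact (pv_final_check (statements.filterMap pvLab) hmem).trans (by rw [h1, h2])
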